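-- pv_equiv track=rewrite | github.com/Santhosh-636/Cross-Lingual-Sentiment-Analysis | src/sentiment/analyzer.py | sentiment_shift
-- ===== SOURCE A (Python) =====
-- def sentiment_shift(sentiments_over_time):
--     shift = {}
--     for time_period, sentiments in sentiments_over_time.items():
--         shift[time_period] = {
--             'positive': sum(1 for s in sentiments if s == 'positive'),
--             'negative': sum(1 for s in sentiments if s == 'negative'),
--             'neutral': sum(1 for s in sentiments if s == 'neutral'),
--         }
--     return shift
-- ===== SOURCE B (Python) =====
-- def sentiment_shift(sentiments_over_time):
--     shift = {}
--     for time_period, sentiments in sentiments_over_time.items():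
--         # sort, then run-length scan: each distinct label is one contiguous run,
--         # whose length is its count; assign the run length to the matching slot.
--         ordered = sorted(sentiments)
--         cp = cn = cu = 0
--         i = 0
--         while i < len(ordered):
--             j = i
--             while j < len(ordered) and ordered[j] == ordered[i]:
--                 j += 1
--             label, n = ordered[i], j - i
--             if label == 'positive':
--                 cp = n
--             elif label == 'negative':
--                 cn = n
--             elif label == 'neutral':
--                 cu = n
--             i = j
--         shift[time_period] = {'positive': cp, 'negative': cn, 'neutral': cu}
--     return shift
-- ===== Notes on version B (the rewrite author's own statement) =====
-- stated objective: alternative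
-- what changed: Replaces A's three per-label generator scans with sort-then-run-length: each period's list is sorted, contiguous runs are measured in one scan, and a run's length is assigned to the matching fixed label (correct because sorting makes equal labels contiguous, so a run length is exactly that label's count).
import Mathlib
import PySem

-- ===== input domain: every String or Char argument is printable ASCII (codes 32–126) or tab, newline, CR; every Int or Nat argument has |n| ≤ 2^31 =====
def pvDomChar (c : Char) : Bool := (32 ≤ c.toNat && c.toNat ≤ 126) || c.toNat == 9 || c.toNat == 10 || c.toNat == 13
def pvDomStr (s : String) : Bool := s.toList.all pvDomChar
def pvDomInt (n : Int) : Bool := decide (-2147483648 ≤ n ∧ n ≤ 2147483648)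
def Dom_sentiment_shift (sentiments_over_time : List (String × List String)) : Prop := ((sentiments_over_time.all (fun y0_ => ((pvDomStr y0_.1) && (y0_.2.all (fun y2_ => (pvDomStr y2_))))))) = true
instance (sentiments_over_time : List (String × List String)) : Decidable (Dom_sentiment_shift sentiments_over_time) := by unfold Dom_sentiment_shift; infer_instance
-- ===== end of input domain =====

-- B counts each period's labels by sorting the list and measuring contiguous runs
-- instead of A's three per-label scans (objective: alternative; not faster).

-- ===== PORT A =====
-- A: for each (time_period, sentiments), three generator-sum scans counting each label.
def sentiment_shift (sentiments_over_time : List (String × List String)) : List (String × List (String × Int)) :=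
  (sentiments_over_time.foldl
    (fun shift p =>
      shift.insert p.1
        [("positive", p.2.foldl (fun acc s => if s == "positive" then acc + 1 else acc) 0),
         ("negative", p.2.foldl (fun acc s => if s == "negative" then acc + 1 else acc) 0),
         ("neutral",  p.2.foldl (fun acc s => if s == "neutral" then acc + 1 else acc) 0)])
    (PySem.Dict.empty : PySem.Dict String (List (String × Int)))).items

-- ===== PORT B =====
-- B's inner while loops: scan one run of equal adjacent elements of the sorted list,
-- emit (label, run length), continue after the run.  takeWhile/dropWhile is exactly
-- that scan (advance j while ordered[j] == ordered[i]; resume at j).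
def pvRuns : List String → List (String × Int)
  | [] => []
  | x :: t => (x, 1 + ((t.takeWhile (· == x)).length : Int)) :: pvRuns (t.dropWhile (· == x))
termination_by l => l.length
decreasing_by
  exact Nat.lt_succ_of_le (List.length_dropWhile_le _ _)

-- B: sort, run-length scan, assign each run's length to the matching label slot.
def sentiment_shift_alt (sentiments_over_time : List (String × List String)) : List (String × List (String × Int)) :=
  (sentiments_over_time.foldl
    (fun shift p =>
      let ordered := PySem.List.sorted p.2 (fun s => s) false
      let c := (pvRuns ordered).foldl
        (fun (c : Int × Int × Int) r =>
          if r.1 == "positive" then (r.2, c.2.1, c.2.2)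
          else if r.1 == "negative" then (c.1, r.2, c.2.2)
          else if r.1 == "neutral" then (c.1, c.2.1, r.2)
          else c) (0, 0, 0)
      shift.insert p.1 [("positive", c.1), ("negative", c.2.1), ("neutral", c.2.2)])
    (PySem.Dict.empty : PySem.Dict String (List (String × Int)))).items

-- ===== PRECONDITION & SPEC =====
def Spec_sentiment_shift (sentiments_over_time : List (String × List String)) (out : List (String × List (String × Int))) : Prop := out = sentiment_shift_alt sentiments_over_time
instance (sentiments_over_time : List (String × List String)) (out : List (String × List (String × Int))) : Decidable (Spec_sentiment_shift sentiments_over_time out) := by unfold Spec_sentiment_shift; infer_instance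

-- ===== CLAIM (what is proved, stated in full; the proofs are below) =====
def Claim_equal_sentiment_shift : Prop := ∀ (sentiments_over_time : List (String × List String)), Dom_sentiment_shift sentiments_over_time → Spec_sentiment_shift sentiments_over_time (sentiment_shift sentiments_over_time)

-- ===== LEMMAS AND PROOFS =====

-- "last run with key k, else the accumulator": what one slot of B's triple fold computes.
def pvSlot (k : String) (a : Int) (rs : List (String × Int)) : Int :=
  rs.foldl (fun acc r => if r.1 = k then r.2 else acc) a

-- B's triple fold is three independent pvSlot folds.
theorem pv_foldTriple (rs : List (String × Int)) (a b c : Int) :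
    rs.foldl
      (fun (c : Int × Int × Int) r =>
        if r.1 == "positive" then (r.2, c.2.1, c.2.2)
        else if r.1 == "negative" then (c.1, r.2, c.2.2)
        else if r.1 == "neutral" then (c.1, c.2.1, r.2)
        else c) (a, b, c)
    = (pvSlot "positive" a rs, pvSlot "negative" b rs, pvSlot "neutral" c rs) := by
  induction rs generalizing a b c with
  | nil => simp [pvSlot]
  | cons r t ih =>
    simp only [List.foldl_cons, pvSlot, beq_iff_eq]
    by_cases h1 : r.1 = "positive" <;> by_cases h2 : r.1 = "negative" <;>
      by_cases h3 : r.1 = "neutral" <;> simp_all [pvSlot]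

-- in a sorted (chain-≤) list, no element equal to the head survives past the head's run
theorem pv_head_not_mem_drop (x : String) (t : List String)
    (h : (x :: t).Pairwise (· ≤ ·)) : x ∉ t.dropWhile (· == x) := by
  intro hx
  have hle : ∀ z ∈ t, x ≤ z := (List.pairwise_cons.mp h).1
  have hpt : t.Pairwise (· ≤ ·) := (List.pairwise_cons.mp h).2
  cases hd : t.dropWhile (· == x) with
  | nil => rw [hd] at hx; exact (List.not_mem_nil) hx
  | cons y rest =>
    have hy : (y == x) = false := by
      have := List.head_dropWhile_not (p := (· == x)) (l := t)
      simp [hd] at this; simpa using this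
    have hyx : y ≠ x := by simpa using hy
    rw [hd] at hx
    rcases List.mem_cons.mp hx with h' | h'
    · exact hyx h'.symm
    · -- x occurs after y in the sorted suffix: y ≤ x; and x ≤ y from the head; so y = x
      have hsub : (y :: rest).Sublist t := hd ▸ List.dropWhile_sublist _
      have hpyr : (y :: rest).Pairwise (· ≤ ·) := hpt.sublist hsub
      have hyz : y ≤ x := (List.pairwise_cons.mp hpyr).1 x h'
      have hmem : y ∈ t := hsub.mem List.mem_cons_self
      exact hyx (le_antisymm hyz (hle y hmem))

-- pvSlot over the runs of a sorted list: the count when k occurs, else the accumulator.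
theorem pv_slot_runs (k : String) (l : List String) (h : l.Pairwise (· ≤ ·)) (a : Int) :
    pvSlot k a (pvRuns l) = if k ∈ l then (l.count k : Int) else a := by
  suffices H : ∀ n (l : List String), l.length ≤ n → l.Pairwise (· ≤ ·) → ∀ a : Int,
      pvSlot k a (pvRuns l) = if k ∈ l then (l.count k : Int) else a from
    H l.length l le_rfl h a
  clear h a l
  intro n
  induction n with
  | zero =>
    intro l hl _ a
    rw [List.length_eq_zero_iff.mp (Nat.le_zero.mp hl)]
    simp [pvRuns, pvSlot]
  | succ n ihn =>
    intro l hl h a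
    match l with
    | [] => simp [pvRuns, pvSlot]
    | x :: t =>
    have ih : ∀ a : Int, pvSlot k a (pvRuns (t.dropWhile (· == x)))
        = if k ∈ t.dropWhile (· == x) then ((t.dropWhile (· == x)).count k : Int) else a := by
      intro a
      exact ihn _ (le_trans (List.length_dropWhile_le _ _) (Nat.succ_le_succ_iff.mp hl))
        ((List.pairwise_cons.mp h).2.sublist (List.dropWhile_sublist _)) a
    have hxd : x ∉ t.dropWhile (· == x) := pv_head_not_mem_drop x t h
    have htw : ∀ z ∈ t.takeWhile (· == x), z = x := by
      intro z hz
      have := List.mem_takeWhile_imp hz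
      simpa using this
    have hsplit : t.takeWhile (· == x) ++ t.dropWhile (· == x) = t :=
      List.takeWhile_append_dropWhile
    rw [pvRuns]
    simp only [pvSlot, List.foldl_cons]
    by_cases hk : k = x
    · subst hk
      have hck : (t.takeWhile (· == k)).count k = (t.takeWhile (· == k)).length := by
        rw [List.count_eq_length]
        intro b hb; exact ((htw b hb).symm ▸ rfl)
      have hcd : (t.dropWhile (· == k)).count k = 0 := List.count_eq_zero.mpr hxd
      have hct : (((k :: t).count k : Int)) = 1 + ((t.takeWhile (· == k)).length : Int) := by
        have h1 : t.count k = (t.takeWhile (· == k)).length := by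
          conv_lhs => rw [← hsplit]
          rw [List.count_append, hck, hcd]
          omega
        rw [List.count_cons_self, h1]
        push_cast; ring
      rw [if_pos rfl]
      rw [show List.foldl (fun acc r => if r.1 = k then r.2 else acc)
            (1 + ((t.takeWhile (· == k)).length : Int)) (pvRuns (t.dropWhile (· == k)))
          = pvSlot k (1 + ((t.takeWhile (· == k)).length : Int))
              (pvRuns (t.dropWhile (· == k))) from rfl]
      rw [ih]
      rw [if_neg hxd, if_pos (List.mem_cons_self)]
      exact hct.symm
    · have hkt : k ∉ t.takeWhile (· == x) := fun hm => hk (htw k hm)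
      have hmem : k ∈ x :: t ↔ k ∈ t.dropWhile (· == x) := by
        constructor
        · intro hm
          rcases List.mem_cons.mp hm with h' | h'
          · exact absurd h' hk
          · rw [← hsplit] at h'
            rcases List.mem_append.mp h' with h'' | h''
            · exact absurd h'' hkt
            · exact h''
        · intro hm
          exact List.mem_cons.mpr (Or.inr (hsplit ▸ List.mem_append.mpr (Or.inr hm)))
      have hxk : ¬ x = k := fun e => hk e.symm
      have hcnt : (((x :: t).count k : Int)) = (((t.dropWhile (· == x)).count k : Int)) := by
        have h1 : t.count k = (t.dropWhile (· == x)).count k := by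
          conv_lhs => rw [← hsplit]
          rw [List.count_append, List.count_eq_zero.mpr hkt]
          omega
        simp [h1, hxk]
      rw [if_neg hxk]
      rw [show List.foldl (fun acc r => if r.1 = k then r.2 else acc) a
            (pvRuns (t.dropWhile (· == x)))
          = pvSlot k a (pvRuns (t.dropWhile (· == x))) from rfl]
      rw [ih]
      by_cases hm : k ∈ t.dropWhile (· == x)
      · rw [if_pos hm, if_pos (hmem.mpr hm)]
        exact hcnt.symm
      · rw [if_neg hm, if_neg (fun hx => hm (hmem.mp hx))]

-- the two per-period step functions store the same triple
theorem pv_step_eq :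
    (fun (shift : PySem.Dict String (List (String × Int))) (p : String × List String) =>
      shift.insert p.1
        [("positive", p.2.foldl (fun acc s => if s == "positive" then acc + 1 else acc) 0),
         ("negative", p.2.foldl (fun acc s => if s == "negative" then acc + 1 else acc) 0),
         ("neutral",  p.2.foldl (fun acc s => if s == "neutral" then acc + 1 else acc) 0)])
    = (fun (shift : PySem.Dict String (List (String × Int))) (p : String × List String) =>
      let ordered := PySem.List.sorted p.2 (fun s => s) false
      let c := (pvRuns ordered).foldl
        (fun (c : Int × Int × Int) r =>
          if r.1 == "positive" then (r.2, c.2.1, c.2.2)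
          else if r.1 == "negative" then (c.1, r.2, c.2.2)
          else if r.1 == "neutral" then (c.1, c.2.1, r.2)
          else c) (0, 0, 0)
      shift.insert p.1 [("positive", c.1), ("negative", c.2.1), ("neutral", c.2.2)]) := by
  funext shift p
  have hpw : (PySem.List.sorted p.2 (fun s => s) false).Pairwise (· ≤ ·) :=
    PySem.List.sorted_pairwise p.2 (fun s => s)
  have hperm := PySem.List.sorted_perm p.2 (fun s => s) false
  have hcount : ∀ k : String,
      (if k ∈ PySem.List.sorted p.2 (fun s => s) false
       then ((PySem.List.sorted p.2 (fun s => s) false).count k : Int) else 0)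
      = (p.2.count k : Int) := by
    intro k
    by_cases hm : k ∈ PySem.List.sorted p.2 (fun s => s) false
    · simp [hm, hperm.count_eq]
    · have : k ∉ p.2 := fun h => hm (hperm.mem_iff.mpr h)
      simp [hm, List.count_eq_zero.mpr this]
  simp only [pv_foldTriple, pv_slot_runs _ _ hpw, hcount]
  rw [PySem.List.foldl_count_if, PySem.List.foldl_count_if, PySem.List.foldl_count_if]
  simp [List.count]

-- ===== VERDICT (by name: the statement is the Claim_ definition above) =====
theorem sentiment_shift_spec : Claim_equal_sentiment_shift := by
  intro xs _
  unfold Spec_sentiment_shift sentiment_shift sentiment_shift_alt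
  rw [pv_step_eq]
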